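-- pv_equiv track=rewrite | github.com/SantiagoAcostaMarino/PRUBEA | ovnis.py | avistamientos_por_forma
-- ===== SOURCE A (Python) =====
-- def avistamientos_por_forma (avistamientos:dict) -> dict:#9.1
--     avistamientos_forma = {}
--     for pais in avistamientos:
--         for ciudad in avistamientos[pais]:
--             if ciudad["shape"] not in avistamientos_forma:
--                 forma = []
--             else:
--                 forma = avistamientos_forma[ciudad["shape"]]
--             avistamientos_forma[ciudad["shape"]]=forma
--             forma.append(ciudad)
--     return avistamientos_forma
-- ===== SOURCE B (Python) =====
-- def avistamientos_por_forma(avistamientos: dict) -> dict:  # 9.1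
--     # Flatten once, list the distinct shapes in first-appearance order,
--     # then build each group by filtering the flat list per shape.
--     flat = [ciudad for pais in avistamientos for ciudad in avistamientos[pais]]
--     shapes = []
--     for ciudad in flat:
--         if ciudad["shape"] not in shapes:
--             shapes.append(ciudad["shape"])
--     return {s: [c for c in flat if c["shape"] == s] for s in shapes}
-- ===== Notes on version B (the rewrite author's own statement) =====
-- stated objective: alternative
-- what changed: Replaces A's incremental dict-of-growing-lists (mutating the shared list object and re-inserting it per city) by a flatten-once / distinct-shapes / filter-per-shape construction: the result dict is built in one comprehension at the end instead of being threaded through the loop.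
-- outside the precondition, e.g. on avistamientos_por_forma({'es': [{}]}): A raises KeyError, B raises KeyError
import Mathlib
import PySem

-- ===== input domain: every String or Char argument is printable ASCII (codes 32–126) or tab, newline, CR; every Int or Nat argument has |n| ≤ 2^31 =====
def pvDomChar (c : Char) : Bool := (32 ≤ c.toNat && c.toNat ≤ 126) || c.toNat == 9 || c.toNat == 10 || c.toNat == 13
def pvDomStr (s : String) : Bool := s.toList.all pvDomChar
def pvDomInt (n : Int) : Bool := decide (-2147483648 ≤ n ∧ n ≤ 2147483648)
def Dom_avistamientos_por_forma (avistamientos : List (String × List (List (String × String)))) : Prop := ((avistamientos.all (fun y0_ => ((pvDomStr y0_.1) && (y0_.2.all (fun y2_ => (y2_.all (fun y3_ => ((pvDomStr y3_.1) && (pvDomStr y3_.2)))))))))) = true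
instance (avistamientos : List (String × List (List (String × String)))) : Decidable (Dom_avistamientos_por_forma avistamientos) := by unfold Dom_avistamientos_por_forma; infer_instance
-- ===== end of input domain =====

-- B groups the sightings by flattening once, listing the distinct shapes in first-appearance
-- order, and filtering the flat list per shape, instead of A's incremental dict of growing lists.
-- Return-value equivalence only: Python A mutates the lists it stores while building them; the
-- final value is what is compared.

-- ciudad["shape"]: first-match association-list lookup, totalized with "" (Pre_ guarantees the key).
def pvShape (ciudad : List (String × String)) : String :=
  (PySem.Dict.mk ciudad).getD "shape" ""

-- ===== PORT A =====
def avistamientos_por_forma (avistamientos : List (String × List (List (String × String)))) : List (String × List (List (String × String))) :=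
  (avistamientos.foldl
    (fun d pais =>
      ((PySem.Dict.mk avistamientos).getD pais.1 []).foldl
        (fun d ciudad =>
          let forma := if (d.contains (pvShape ciudad)) = false then []
                       else d.getD (pvShape ciudad) []
          d.insert (pvShape ciudad) (forma ++ [ciudad]))
        d)
    PySem.Dict.empty).items

-- ===== PORT B =====
def avistamientos_por_forma_alt (avistamientos : List (String × List (List (String × String)))) : List (String × List (List (String × String))) :=
  let flat := avistamientos.flatMap (fun pais => (PySem.Dict.mk avistamientos).getD pais.1 [])
  let shapes := flat.foldl (fun ss ciudad => PySem.Set.add ss (pvShape ciudad)) []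
  shapes.map (fun s => (s, flat.filter (fun c => pvShape c == s)))

-- ===== PRECONDITION & SPEC =====
-- Pre_ excludes (a) cities without a "shape" key, on which the Python A raises KeyError (B too),
-- and (b) association lists with duplicate keys (outer or inside a city), which no Python dict realizes.
def Pre_avistamientos_por_forma (avistamientos : List (String × List (List (String × String)))) : Prop :=
  (avistamientos.map Prod.fst).Nodup ∧
  ∀ p ∈ avistamientos, ∀ c ∈ p.2, (c.map Prod.fst).Nodup ∧ (PySem.Dict.mk c).contains "shape" = true
instance (avistamientos : List (String × List (List (String × String)))) : Decidable (Pre_avistamientos_por_forma avistamientos) := by unfold Pre_avistamientos_por_forma; infer_instance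

def pvWitness_avistamientos_por_forma : (List (String × List (List (String × String)))) :=
  [("es", [[("shape", "circle")], [("shape", "disk")]]), ("us", [[("shape", "circle")]])]

def Spec_avistamientos_por_forma (avistamientos : List (String × List (List (String × String)))) (out : List (String × List (List (String × String)))) : Prop := out = avistamientos_por_forma_alt avistamientos
instance (avistamientos : List (String × List (List (String × String)))) (out : List (String × List (List (String × String)))) : Decidable (Spec_avistamientos_por_forma avistamientos out) := by unfold Spec_avistamientos_por_forma; infer_instance

-- ===== CLAIM (what is proved, stated in full; the proofs are below) =====
def Claim_equal_avistamientos_por_forma : Prop := ∀ (avistamientos : List (String × List (List (String × String)))), Dom_avistamientos_por_forma avistamientos → Pre_avistamientos_por_forma avistamientos → Spec_avistamientos_por_forma avistamientos (avistamientos_por_forma avistamientos)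

-- ===== LEMMAS AND PROOFS =====

-- A's inner loop body, as a function of the accumulator dict and one city.
def pvStep (d : PySem.Dict String (List (List (String × String)))) (ciudad : List (String × String)) : PySem.Dict String (List (List (String × String))) :=
  let forma := if (d.contains (pvShape ciudad)) = false then []
               else d.getD (pvShape ciudad) []
  d.insert (pvShape ciudad) (forma ++ [ciudad])

-- the grouped dict of a flat city list, as B describes it
def pvGroup (L : List (List (String × String))) : List (String × List (List (String × String))) :=
  (PySem.Set.ofList (L.map pvShape)).map (fun s => (s, L.filter (fun c => pvShape c == s)))

theorem pvGroup_fst (L : List (List (String × String))) :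
    (pvGroup L).map Prod.fst = PySem.Set.ofList (L.map pvShape) := by
  simp [pvGroup, List.map_map, Function.comp_def]

theorem pvFold_step (L : List (List (String × String))) :
    (L.foldl pvStep PySem.Dict.empty).items = pvGroup L := by
  induction L using List.reverseRecOn with
  | nil => simp [pvGroup, PySem.Dict.empty, PySem.Set.ofList]
  | append_singleton M c ih =>
    have hd : M.foldl pvStep PySem.Dict.empty = PySem.Dict.mk (pvGroup M) := by
      apply PySem.Dict.ext; exact ih
    rw [List.foldl_append, List.foldl_cons, List.foldl_nil, hd]
    have hkeys : (PySem.Dict.mk (pvGroup M)).keys = PySem.Set.ofList (M.map pvShape) := by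
      simpa [PySem.Dict.keys] using pvGroup_fst M
    have hnd : (PySem.Dict.mk (pvGroup M)).keys.Nodup := by
      rw [hkeys]; exact PySem.Set.nodup_ofList _
    have hofl : PySem.Set.ofList ((M ++ [c]).map pvShape)
        = PySem.Set.add (PySem.Set.ofList (M.map pvShape)) (pvShape c) := by
      rw [List.map_append]; exact PySem.Set.ofList_append_singleton _ _
    by_cases hmem : pvShape c ∈ PySem.Set.ofList (M.map pvShape)
    · -- shape already present: insert overwrites in place
      have hcont : (PySem.Dict.mk (pvGroup M)).contains (pvShape c) = true := by
        rw [PySem.Dict.contains_eq_decide_mem_keys, hkeys]; simpa using hmem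
      have hmemitems : (pvShape c, M.filter (fun c' => pvShape c' == pvShape c)) ∈ pvGroup M := by
        simp only [pvGroup]
        exact List.mem_map.2 ⟨pvShape c, hmem, rfl⟩
      have hgetD : (PySem.Dict.mk (pvGroup M)).getD (pvShape c) []
          = M.filter (fun c' => pvShape c' == pvShape c) :=
        PySem.Dict.getD_of_mem_items _ hmemitems hnd []
      rw [pvStep]
      simp only [hcont]
      rw [PySem.Dict.items_insert_of_contains _ _ hcont, hgetD]
      show (pvGroup M).map _ = pvGroup (M ++ [c])
      rw [pvGroup, pvGroup, hofl, PySem.Set.add_of_mem hmem, List.map_map]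
      apply List.map_congr_left
      intro t _
      by_cases hts : t = pvShape c
      · subst hts; simp [List.filter_append]
      · have hct : (pvShape c == t) = false :=
          beq_eq_false_iff_ne.2 (fun h => hts h.symm)
        simp [List.filter_append, hts, hct]
    · -- fresh shape: insert appends a new entry
      have hcont : (PySem.Dict.mk (pvGroup M)).contains (pvShape c) = false := by
        rw [PySem.Dict.contains_eq_decide_mem_keys, hkeys]; simpa using hmem
      rw [pvStep]
      simp only [hcont]
      rw [PySem.Dict.items_insert_of_not_contains _ _ hcont]
      show (pvGroup M) ++ [(pvShape c, [] ++ [c])] = pvGroup (M ++ [c])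
      have hfilt : M.filter (fun c' => pvShape c' == pvShape c) = [] := by
        rw [List.filter_eq_nil_iff]
        intro a ha hk
        exact hmem ((PySem.Set.mem_ofList _ _).2 (List.mem_map.2 ⟨a, ha, by simpa using hk⟩))
      rw [pvGroup, pvGroup, hofl, PySem.Set.add_of_not_mem hmem, List.map_append]
      congr 1
      · apply List.map_congr_left
        intro t ht
        have hct : (pvShape c == t) = false := by
          refine beq_eq_false_iff_ne.2 ?_
          intro h; apply hmem; rw [h]; exact ht
        simp [List.filter_append, hct]
      · simp [List.filter_append, hfilt]

-- A's double loop is the fold of pvStep over B's flat list.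
theorem pvA_eq_fold (avistamientos : List (String × List (List (String × String)))) :
    avistamientos_por_forma avistamientos
      = ((avistamientos.flatMap (fun pais => (PySem.Dict.mk avistamientos).getD pais.1 [])).foldl
          pvStep PySem.Dict.empty).items := by
  rw [avistamientos_por_forma, List.foldl_flatMap]
  rfl

-- ===== VERDICT (by name: the statement is the Claim_ definition above) =====
theorem avistamientos_por_forma_spec : Claim_equal_avistamientos_por_forma := by
  intro av _ _
  show avistamientos_por_forma av = avistamientos_por_forma_alt av
  rw [pvA_eq_fold, pvFold_step, avistamientos_por_forma_alt]
  simp only [pvGroup]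
  rw [← PySem.Set.update_nil_left, ← PySem.Set.update_map_eq_foldl_add]
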